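-- pv_equiv track=rewrite | github.com/EHwooKim/Algorithms | Test/sw/pro05.py | minX
-- ===== SOURCE A (Python) =====
-- def minX(arr):
--   start = 0
--   tmp = 0
--   for a in arr:
--     tmp += a
--     while tmp < 1:
--       start += 1
--       tmp += 1
--   return start
-- ===== SOURCE B (Python) =====
-- def minX(arr):
--     run = 0
--     m = None
--     for a in arr:
--         run += a
--         if m is None or run < m:
--             m = run
--     return 0 if m is None else max(0, 1 - m)
-- ===== Notes on version B (the rewrite author's own statement) =====
-- stated objective: alternative
-- what changed: Replaces the greedy simulation (per-element inner while injecting +1 increments) with a single pass that tracks the minimum prefix sum and returns max(0, 1 - min) in closed form.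
import Mathlib
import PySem

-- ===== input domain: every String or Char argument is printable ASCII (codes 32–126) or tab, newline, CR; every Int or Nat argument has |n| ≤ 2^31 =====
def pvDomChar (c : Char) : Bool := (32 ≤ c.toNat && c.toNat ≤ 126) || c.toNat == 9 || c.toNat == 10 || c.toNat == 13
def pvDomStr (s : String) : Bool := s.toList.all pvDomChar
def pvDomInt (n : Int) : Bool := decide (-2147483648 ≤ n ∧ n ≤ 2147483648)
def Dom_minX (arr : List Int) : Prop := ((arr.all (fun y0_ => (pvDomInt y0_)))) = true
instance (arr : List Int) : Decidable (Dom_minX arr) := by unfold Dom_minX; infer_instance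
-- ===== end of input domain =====

-- B replaces A's greedy increment simulation with one pass computing the minimum
-- prefix sum and returning max(0, 1 - min) in closed form (objective: alternative).

-- ===== PORT A =====
-- the inner `while tmp < 1: start += 1; tmp += 1` loop of A
def pvWhileA (start tmp : Int) : Int × Int :=
  if tmp < 1 then pvWhileA (start + 1) (tmp + 1) else (start, tmp)
termination_by (1 - tmp).toNat
decreasing_by omega

def pvStepA (st : Int × Int) (a : Int) : Int × Int :=
  pvWhileA st.1 (st.2 + a)

def minX (arr : List Int) : Int :=
  (arr.foldl pvStepA (0, 0)).1

-- ===== PORT B =====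
def pvStepB (st : Int × Option Int) (a : Int) : Int × Option Int :=
  let run := st.1 + a
  match st.2 with
  | none => (run, some run)
  | some m => (run, if run < m then some run else some m)

def minX_alt (arr : List Int) : Int :=
  match (arr.foldl pvStepB (0, none)).2 with
  | none => 0
  | some m => max 0 (1 - m)

-- ===== PRECONDITION & SPEC =====
def Spec_minX (arr : List Int) (out : Int) : Prop := out = minX_alt arr
instance (arr : List Int) (out : Int) : Decidable (Spec_minX arr out) := by unfold Spec_minX; infer_instance

-- ===== CLAIM (what is proved, stated in full; the proofs are below) =====
def Claim_equal_minX : Prop := ∀ (arr : List Int), Dom_minX arr → Spec_minX arr (minX arr)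

-- ===== LEMMAS AND PROOFS =====

-- closed form of A's inner while loop
theorem pvWhileA_eq (s t : Int) : pvWhileA s t = (s + max (1 - t) 0, max t 1) := by
  fun_induction pvWhileA s t with
  | case1 s t h ih =>
      rw [ih]
      simp only [Prod.mk.injEq]
      constructor <;> omega
  | case2 s t h =>
      simp only [Prod.mk.injEq]
      constructor <;> omega

-- the invariant relating A's fold state (start, tmp) to B's fold state (run, m):
-- start is determined by m, and tmp = run + start.
def pvInv (s : Int) (mo : Option Int) : Prop :=
  match mo with
  | none => s = 0
  | some m => s = max 0 (1 - m)

theorem fold_agree (arr : List Int) : ∀ (s run : Int) (mo : Option Int),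
    pvInv s mo →
    (arr.foldl pvStepA (s, run + s)).1 =
      (match (arr.foldl pvStepB (run, mo)).2 with
       | none => 0
       | some m => max 0 (1 - m)) := by
  induction arr with
  | nil =>
      intro s run mo hinv
      cases mo with
      | none => simpa [pvInv] using hinv
      | some m => simpa [pvInv] using hinv
  | cons a rest ih =>
      intro s run mo hinv
      simp only [List.foldl_cons, pvStepA, pvStepB, pvWhileA_eq]
      cases mo with
      | none =>
          simp only [pvInv] at hinv
          have h2 : max (run + s + a) 1 = (run + a) + (s + max (1 - (run + s + a)) 0) := by
            omega
          rw [h2]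
          exact ih _ (run + a) (some (run + a)) (by simp only [pvInv]; omega)
      | some m =>
          simp only [pvInv] at hinv
          have h2 : max (run + s + a) 1 = (run + a) + (s + max (1 - (run + s + a)) 0) := by
            omega
          rw [h2]
          refine ih _ (run + a) (if run + a < m then some (run + a) else some m) ?_
          split_ifs <;> simp only [pvInv] <;> omega

-- ===== VERDICT (by name: the statement is the Claim_ definition above) =====
theorem minX_spec : Claim_equal_minX := by
  intro arr _
  unfold Spec_minX minX minX_alt
  simpa using fold_agree arr 0 0 none (by simp [pvInv])
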